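-- pv_equiv track=rewrite | github.com/Zuhye/PythonAlgorithm | Graph Traversal/Lv3_양과늑대.py | solution
-- ===== SOURCE A (Python) =====
-- def solution(info, edges):
--     answer = []
--     visited = [False] * len(info)
--
--     def dfs(sheep, wolves):
--         if sheep > wolves:
--             answer.append(sheep)
--         else:
--             return
--
--         for p, c in edges:
--             if visited[p] and not visited[c]:
--                 visited[c] = True
--                 if info[c] == 0:
--                     dfs(sheep + 1, wolves)
--                 else:
--                     dfs(sheep, wolves + 1)
--                 visited[c] = False
--
--     visited[0] = True
--     dfs(1, 0)  # 제일 처음에 양 1 / 늑대 0 으로 시작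
--
--     return max(answer)
-- ===== SOURCE B (Python) =====
-- def solution(info, edges):
--     # Build a children-adjacency list once, then DFS carrying
--     # (sheep, wolves, chosen, frontier) instead of rescanning every edge
--     # against a mutated-and-restored visited array on every call.
--     n = len(info)
--     children = [[] for _ in range(n)]
--     for p, c in edges:
--         children[p].append(c)
--
--     def dfs(sheep, wolves, chosen, frontier):
--         best = sheep
--         for node in frontier:
--             if chosen[node]:
--                 continue
--             if info[node] == 0:
--                 s, w = sheep + 1, wolves
--             else:
--                 s, w = sheep, wolves + 1
--             if s > w:
--                 nc = chosen.copy()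
--                 nc[node] = True
--                 r = dfs(s, w, nc, frontier + children[node])
--                 if r > best:
--                     best = r
--         return best
--
--     chosen = [False] * n
--     chosen[0] = True
--     return dfs(1, 0, chosen, children[0])
-- ===== Notes on version B (the rewrite author's own statement) =====
-- stated objective: alternative
-- what changed: Replaces A's per-call rescan of the whole edge list against a mutated-and-restored visited array (with an answer list maxed at the end) by a children-adjacency list built once and a DFS carrying (sheep, wolves, chosen, frontier) that scans only the current frontier and returns the running max; it trades A's in-place backtracking for per-branch state copies.
-- outside the precondition, e.g. on solution([0, 0], [(1, 7)]): A returns 1, B returns 1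
import Mathlib
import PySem

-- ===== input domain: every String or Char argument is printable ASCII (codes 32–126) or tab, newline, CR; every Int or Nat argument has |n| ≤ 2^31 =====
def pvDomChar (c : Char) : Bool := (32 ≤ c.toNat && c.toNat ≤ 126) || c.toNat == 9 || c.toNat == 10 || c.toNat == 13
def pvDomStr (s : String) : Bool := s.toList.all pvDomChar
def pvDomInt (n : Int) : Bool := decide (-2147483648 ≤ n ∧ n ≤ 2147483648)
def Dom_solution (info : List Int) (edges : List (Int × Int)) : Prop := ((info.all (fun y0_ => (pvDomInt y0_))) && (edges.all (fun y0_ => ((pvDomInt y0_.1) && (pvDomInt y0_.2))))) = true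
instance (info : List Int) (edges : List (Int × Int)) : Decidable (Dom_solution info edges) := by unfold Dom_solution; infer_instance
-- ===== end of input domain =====

-- B replaces A's per-call rescan of all edges over a mutated-and-restored visited
-- array (with an answer list maxed at the end) by a children-adjacency list built
-- once and a frontier-carrying DFS returning the running max.

-- ===== PORT A =====
def dfsA (info : List Int) (edges : List (Int × Int)) : Nat → Int → Int → (List Bool × List Int) → (List Bool × List Int)
  | 0, _, _, st => st
  | Nat.succ f, s, w, st =>
    if s > w then
      edges.foldl (fun acc e =>
        if PySem.List.pyGetD acc.1 e.1 false && !(PySem.List.pyGetD acc.1 e.2 false) then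
          let st1 := dfsA info edges f
              (if PySem.List.pyGetD info e.2 0 = 0 then s + 1 else s)
              (if PySem.List.pyGetD info e.2 0 = 0 then w else w + 1)
              (PySem.List.pySetD acc.1 e.2 true, acc.2)
          (PySem.List.pySetD st1.1 e.2 false, st1.2)
        else acc) (st.1, st.2 ++ [s])
    else st

def solution (info : List Int) (edges : List (Int × Int)) : Int :=
  let visited := PySem.List.pySetD (List.replicate info.length false) 0 true
  let res := dfsA info edges (info.length + 1) 1 0 (visited, [])
  (PySem.List.max? res.2 (fun y => y)).getD 0

-- ===== PORT B =====
def childrenL (n : Nat) (edges : List (Int × Int)) : List (List Int) :=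
  edges.foldl (fun ch e =>
    PySem.List.pySetD ch e.1 (PySem.List.pyGetD ch e.1 [] ++ [e.2])) (List.replicate n [])

def dfsB (info : List Int) (children : List (List Int)) : Nat → Int → Int → List Bool → List Int → Int
  | 0, s, _, _, _ => s
  | Nat.succ f, s, w, chosen, frontier =>
    frontier.foldl (fun best node =>
      if PySem.List.pyGetD chosen node false then best
      else
        let s' := if PySem.List.pyGetD info node 0 = 0 then s + 1 else s
        let w' := if PySem.List.pyGetD info node 0 = 0 then w else w + 1
        if s' > w' then
          let r := dfsB info children f s' w' (PySem.List.pySetD chosen node true)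
            (frontier ++ PySem.List.pyGetD children node [])
          if r > best then r else best
        else best) s

def solution_alt (info : List Int) (edges : List (Int × Int)) : Int :=
  let children := childrenL info.length edges
  let chosen := PySem.List.pySetD (List.replicate info.length false) 0 true
  dfsB info children (info.length + 1) 1 0 chosen (PySem.List.pyGetD children 0 [])

-- ===== PRECONDITION & SPEC =====
-- Pre_ excludes empty info (A raises IndexError on visited[0]) and edges with an
-- endpoint outside [-len(info), len(info)): A raises IndexError as soon as such an
-- endpoint's index expression is evaluated; whether it is ever evaluated depends on
-- the run of the search, so no behaviour is claimed there (on the excluded inputs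
-- where A happens to return, B returns the same value; see the cite).
def Pre_solution (info : List Int) (edges : List (Int × Int)) : Prop :=
  info ≠ [] ∧ ∀ e ∈ edges,
    -(info.length : Int) ≤ e.1 ∧ e.1 < (info.length : Int) ∧
    -(info.length : Int) ≤ e.2 ∧ e.2 < (info.length : Int)
instance (info : List Int) (edges : List (Int × Int)) : Decidable (Pre_solution info edges) := by unfold Pre_solution; infer_instance

def pvWitness_solution : List Int × (List (Int × Int)) := ([0, 0, 1], [(0, 1), (0, 2)])

def Spec_solution (info : List Int) (edges : List (Int × Int)) (out : Int) : Prop := out = solution_alt info edges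
instance (info : List Int) (edges : List (Int × Int)) (out : Int) : Decidable (Spec_solution info edges out) := by unfold Spec_solution; infer_instance

-- ===== CLAIM (what is proved, stated in full; the proofs are below) =====
def Claim_equal_solution : Prop := ∀ (info : List Int) (edges : List (Int × Int)), Dom_solution info edges → Pre_solution info edges → Spec_solution info edges (solution info edges)

-- ===== LEMMAS AND PROOFS =====

-- the slot of a (possibly negative, Python-style) node index in a list of length n
def normN (n : Nat) (x : Int) : Int := if x < 0 then x + n else x

-- the set of visited slots, as a Finset of Ints
def Sv (v : List Bool) : Finset Int :=
  ((Finset.range v.length).filter (fun i => v.getD i false)).image (fun i => (i : Nat) : Nat → Int)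

-- the candidate list: targets of edges whose parent slot is chosen and target slot is not
def candL (n : Nat) (edges : List (Int × Int)) (S : Finset Int) : List Int :=
  (edges.filter (fun e => decide (normN n e.1 ∈ S) && !decide (normN n e.2 ∈ S))).map (fun e => e.2)

-- the common abstract search both programs implement
def F (info : List Int) (edges : List (Int × Int)) : Nat → Finset Int → Int → Int → Int
  | 0, _, s, _ => s
  | Nat.succ f, S, s, w =>
    (candL info.length edges S).foldl (fun acc c =>
      let s' := if PySem.List.pyGetD info c 0 = 0 then s + 1 else s
      let w' := if PySem.List.pyGetD info c 0 = 0 then w else w + 1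
      if s' > w' then max acc (F info edges f (insert (normN info.length c) S) s' w') else acc) s

def falseCnt (v : List Bool) : Nat := v.countP (fun b => !b)

def sInc (info : List Int) (c s : Int) : Int := if PySem.List.pyGetD info c 0 = 0 then s + 1 else s
def wInc (info : List Int) (c w : Int) : Int := if PySem.List.pyGetD info c 0 = 0 then w else w + 1

def stepF (info : List Int) (edges : List (Int × Int)) (f : Nat) (S : Finset Int) (s w : Int) :
    Int → Int → Int :=
  fun acc c => if sInc info c s > wInc info c w
    then max acc (F info edges f (insert (normN info.length c) S)
      (sInc info c s) (wInc info c w)) else acc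

lemma F_succ (info : List Int) (edges : List (Int × Int)) (f : Nat) (S : Finset Int) (s w : Int) :
    F info edges (f + 1) S s w = (candL info.length edges S).foldl (stepF info edges f S s w) s := rfl

lemma norm_bounds (n : Nat) (x : Int) (h1 : -(n : Int) ≤ x) (h2 : x < (n : Int)) :
    0 ≤ normN n x ∧ normN n x < (n : Int) := by
  unfold normN; split <;> omega

lemma inR_of_norm_mem_Iio (n : Nat) (x : Int) (h1 : 0 ≤ normN n x) (h2 : normN n x < (n : Int)) :
    -(n : Int) ≤ x ∧ x < (n : Int) := by
  unfold normN at h1 h2; split at h1 <;> omega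

lemma mem_Sv (v : List Bool) (x : Int) :
    x ∈ Sv v ↔ ∃ i : Nat, i < v.length ∧ v.getD i false = true ∧ x = (i : Int) := by
  simp only [Sv, Finset.mem_image, Finset.mem_filter, Finset.mem_range]
  constructor
  · rintro ⟨i, ⟨hi, hv⟩, h⟩; exact ⟨i, hi, by simpa using hv, h.symm⟩
  · rintro ⟨i, hi, hv, rfl⟩; exact ⟨i, ⟨hi, by simpa using hv⟩, rfl⟩

lemma Sv_bounds (v : List Bool) (x : Int) (h : x ∈ Sv v) : 0 ≤ x ∧ x < (v.length : Int) := by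
  obtain ⟨i, hi, _, rfl⟩ := (mem_Sv v x).1 h
  constructor <;> omega

lemma pyGetD_norm {α : Type} (v : List α) (x : Int) (d : α)
    (h1 : -(v.length : Int) ≤ x) (h2 : x < (v.length : Int)) :
    PySem.List.pyGetD v x d = v.getD (normN v.length x).toNat d := by
  rcases Int.lt_or_le x 0 with hx | hx
  · have hk1 : 0 < (-x).toNat := by omega
    have hk2 : (-x).toNat ≤ v.length := by omega
    have hxk : x = -(((-x).toNat : Nat) : Int) := by omega
    have hsl : (normN v.length x).toNat = v.length - (-x).toNat := by
      unfold normN; split <;> omega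
    conv_lhs => rw [hxk]
    rw [PySem.List.pyGetD_neg_natCast v (-x).toNat d hk1 hk2,
      List.getD_eq_getElem _ d (by omega)]
    congr 1
    omega
  · rw [PySem.List.pyGetD_eq_getElem v d hx h2,
      List.getD_eq_getElem _ d (by unfold normN; split <;> omega)]
    congr 1
    unfold normN
    rw [if_neg (by omega)]

lemma pySetD_norm {α : Type} (v : List α) (x : Int) (b : α)
    (h1 : -(v.length : Int) ≤ x) (h2 : x < (v.length : Int)) :
    PySem.List.pySetD v x b = v.set (normN v.length x).toNat b := by
  rcases Int.lt_or_le x 0 with hx | hx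
  · simp only [PySem.List.pySetD, PySem.List.pySet?, PySem.List.pyIdx?]
    rw [if_neg (by omega), if_pos (by omega)]
    simp only [Option.map_some, Option.getD_some]
    congr 1
    unfold normN
    rw [if_pos (by omega)]
    omega
  · rw [PySem.List.pySetD_of_nonneg v b hx]
    congr 1
    unfold normN
    rw [if_neg (by omega)]

lemma getD_set {α : Type} (v : List α) (n i : Nat) (b : α) (d : α) (hn : n < v.length) :
    (v.set n b).getD i d = if i = n then b else v.getD i d := by
  rcases Nat.lt_or_ge i v.length with hi | hi
  · rw [List.getD_eq_getElem _ d (by simpa using hi), List.getD_eq_getElem _ d hi,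
      List.getElem_set]
    rcases eq_or_ne i n with rfl | hne
    · simp
    · simp [hne, Ne.symm hne]
  · rw [List.getD_eq_default _ d (by simpa using hi), List.getD_eq_default _ d hi]
    have : i ≠ n := by omega
    simp [this]

lemma getD_Sv_nat (v : List Bool) (j : Nat) (hj : j < v.length) :
    v.getD j false = decide ((j : Int) ∈ Sv v) := by
  by_cases hmem : (j : Int) ∈ Sv v
  · simp only [hmem, decide_true]
    obtain ⟨i, hi, hv, hpi⟩ := (mem_Sv v (j : Int)).1 hmem
    have : i = j := by omega
    subst this
    exact hv
  · simp only [hmem, decide_false]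
    by_contra hne
    have hb : v.getD j false = true := by simpa using hne
    exact hmem ((mem_Sv v (j : Int)).2 ⟨j, hj, hb, rfl⟩)

lemma pyGetD_Sv (n : Nat) (v : List Bool) (hlen : v.length = n) (x : Int)
    (h1 : -(n : Int) ≤ x) (h2 : x < (n : Int)) :
    PySem.List.pyGetD v x false = decide (normN n x ∈ Sv v) := by
  subst hlen
  have hb := norm_bounds v.length x h1 h2
  rw [pyGetD_norm v x false h1 h2, getD_Sv_nat v _ (by omega)]
  have hc : (((normN v.length x).toNat : Nat) : Int) = normN v.length x := by omega
  rw [hc]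

lemma Sv_set_nat (v : List Bool) (j : Nat) (hj : j < v.length) :
    Sv (v.set j true) = insert (j : Int) (Sv v) := by
  ext x
  rw [mem_Sv, Finset.mem_insert, mem_Sv]
  simp only [List.length_set]
  constructor
  · rintro ⟨i, hi, hv, rfl⟩
    rw [getD_set v j i true false hj] at hv
    by_cases hic : i = j
    · left; omega
    · right; exact ⟨i, hi, by simpa [hic] using hv, rfl⟩
  · rintro (h | ⟨i, hi, hv, rfl⟩)
    · subst h
      exact ⟨j, hj, by rw [getD_set v j j true false hj]; simp, rfl⟩
    · refine ⟨i, hi, ?_, rfl⟩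
      rw [getD_set v j i true false hj]
      split <;> simp_all

lemma Sv_set (n : Nat) (v : List Bool) (hlen : v.length = n) (c : Int)
    (h1 : -(n : Int) ≤ c) (h2 : c < (n : Int)) :
    Sv (PySem.List.pySetD v c true) = insert (normN n c) (Sv v) := by
  subst hlen
  have hb := norm_bounds v.length c h1 h2
  rw [pySetD_norm v c true h1 h2, Sv_set_nat v _ (by omega)]
  have hc : (((normN v.length c).toNat : Nat) : Int) = normN v.length c := by omega
  rw [hc]

lemma restore_set (n : Nat) (v : List Bool) (hlen : v.length = n) (c : Int)
    (h1 : -(n : Int) ≤ c) (h2 : c < (n : Int))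
    (hf : PySem.List.pyGetD v c false = false) :
    PySem.List.pySetD (PySem.List.pySetD v c true) c false = v := by
  subst hlen
  have hb := norm_bounds v.length c h1 h2
  rw [pyGetD_norm v c false h1 h2] at hf
  rw [pySetD_norm v c true h1 h2,
    pySetD_norm _ c false (by simpa using h1) (by simpa using h2)]
  have hsl : (normN (v.set (normN v.length c).toNat true).length c).toNat
      = (normN v.length c).toNat := by simp
  rw [hsl, List.set_set]
  apply List.ext_getElem (by simp)
  intro i hl1 hl2
  rw [List.getElem_set]
  rw [List.getD_eq_getElem _ false (by omega)] at hf
  split <;> simp_all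

lemma falseCnt_set (n : Nat) (v : List Bool) (hlen : v.length = n) (c : Int)
    (h1 : -(n : Int) ≤ c) (h2 : c < (n : Int))
    (hf : PySem.List.pyGetD v c false = false) :
    falseCnt v = falseCnt (PySem.List.pySetD v c true) + 1 := by
  subst hlen
  unfold falseCnt
  have hb := norm_bounds v.length c h1 h2
  rw [pyGetD_norm v c false h1 h2] at hf
  rw [pySetD_norm v c true h1 h2]
  set j := (normN v.length c).toNat with hjdef
  have hn : j < v.length := by omega
  rw [List.getD_eq_getElem _ false hn] at hf
  have h1' : v = v.take j ++ v[j] :: v.drop (j+1) := by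
    rw [List.getElem_cons_drop]; simp
  have h2' : v.set j true = v.take j ++ true :: v.drop (j+1) := by
    rw [List.set_eq_take_append_cons_drop]; simp [hn]
  rw [h2']
  conv_lhs => rw [h1']
  simp [List.countP_append, hf]
  omega

lemma all_visited_of_falseCnt_zero (n : Nat) (v : List Bool) (hlen : v.length = n) (c : Int)
    (h1 : -(n : Int) ≤ c) (h2 : c < (n : Int))
    (hz : falseCnt v = 0) : PySem.List.pyGetD v c false = true := by
  subst hlen
  unfold falseCnt at hz
  have hb := norm_bounds v.length c h1 h2
  rw [pyGetD_norm v c false h1 h2, List.getD_eq_getElem _ false (by omega)]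
  have := List.countP_eq_zero.mp hz
  have hm : v[(normN v.length c).toNat] ∈ v := List.getElem_mem _
  simpa using this _ hm

-- fold-shape lemmas
lemma foldl_max_le (g : Int → Int) :
    ∀ (l : List Int) (x X : Int), x ≤ X → (∀ c ∈ l, g c ≤ X) →
      l.foldl (fun a c => max a (g c)) x ≤ X := by
  intro l
  induction l with
  | nil => intro x X hx _; simpa using hx
  | cons c t ih =>
    intro x X hx hc
    simp only [List.foldl_cons]
    exact ih _ X (max_le hx (hc c (List.mem_cons_self))) (fun d hd => hc d (List.mem_cons_of_mem _ hd))

lemma foldl_max_set_congr (g : Int → Int) (l₁ l₂ : List Int)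
    (h : ∀ c, c ∈ l₁ ↔ c ∈ l₂) (x : Int) :
    l₁.foldl (fun a c => max a (g c)) x = l₂.foldl (fun a c => max a (g c)) x := by
  apply le_antisymm
  · exact foldl_max_le g l₁ x _ (PySem.List.le_foldl_max_int l₂ g x).1
      (fun c hc => (PySem.List.le_foldl_max_int l₂ g x).2 c ((h c).1 hc))
  · exact foldl_max_le g l₂ x _ (PySem.List.le_foldl_max_int l₁ g x).1
      (fun c hc => (PySem.List.le_foldl_max_int l₁ g x).2 c ((h c).2 hc))

lemma max?_of_foldl (Δ : List Int) (M : Int) (h : ∀ x, Δ.foldl max x = max x M) :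
    (PySem.List.max? Δ (fun y => y)).getD 0 = M := by
  cases Δ with
  | nil =>
    have h1 := h (M - 1)
    simp only [List.foldl_nil] at h1
    have : max (M - 1) M = M := max_eq_right (by omega)
    omega
  | cons c t =>
    rw [PySem.List.max?_id_cons]
    simp only [Option.getD_some]
    have h1 := h c
    simp only [List.foldl_cons, max_self] at h1
    have h2 := h M
    simp only [List.foldl_cons] at h2
    have h3 : max M c ≤ t.foldl max (max M c) := (PySem.List.le_foldl_max t (max M c)).1
    rw [max_comm c M] at h1
    have h4 : max M c ≤ max M M := h2 ▸ h3
    simp only [max_self] at h4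
    have h5 : max M c = M := max_eq_left (le_of_max_le_right h4)
    rw [h1, h5]

lemma dfsA_of_not_gt (info : List Int) (edges : List (Int × Int)) (f : Nat) (s w : Int)
    (st : List Bool × List Int) (h : ¬ s > w) : dfsA info edges f s w st = st := by
  cases f <;> simp [dfsA, h]

lemma candL_cons_pos (n : Nat) (e : Int × Int) (es : List (Int × Int)) (S : Finset Int)
    (h : (decide (normN n e.1 ∈ S) && !decide (normN n e.2 ∈ S)) = true) :
    candL n (e :: es) S = e.2 :: candL n es S := by simp [candL, h]

lemma candL_cons_neg (n : Nat) (e : Int × Int) (es : List (Int × Int)) (S : Finset Int)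
    (h : (decide (normN n e.1 ∈ S) && !decide (normN n e.2 ∈ S)) = false) :
    candL n (e :: es) S = candL n es S := by simp [candL, h]

lemma stepF_init (info : List Int) (edges : List (Int × Int)) (f : Nat) (S : Finset Int) (s w : Int) :
    ∀ (l : List Int) (x y : Int),
      l.foldl (stepF info edges f S s w) (max x y) = max x (l.foldl (stepF info edges f S s w) y) := by
  intro l
  induction l with
  | nil => intro x y; simp
  | cons c t ih =>
    intro x y
    by_cases hp : sInc info c s > wInc info c w
    · simp only [List.foldl_cons, stepF, hp, if_true, max_assoc]
      exact ih x _
    · simp only [List.foldl_cons, stepF, hp, if_false]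
      exact ih x y

lemma mem_candL (n : Nat) (edges : List (Int × Int)) (S : Finset Int) (x : Int) :
    x ∈ candL n edges S ↔ ∃ e ∈ edges, normN n e.1 ∈ S ∧ normN n e.2 ∉ S ∧ e.2 = x := by
  simp only [candL, List.mem_map, List.mem_filter, Bool.and_eq_true, decide_eq_true_eq,
    Bool.not_eq_eq_eq_not, Bool.not_true, decide_eq_false_iff_not]
  constructor
  · rintro ⟨e, ⟨he, h1, h2⟩, rfl⟩; exact ⟨e, he, h1, h2, rfl⟩
  · rintro ⟨e, he, h1, h2, rfl⟩; exact ⟨e, ⟨he, h1, h2⟩, rfl⟩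

lemma stepF_filter (info : List Int) (edges : List (Int × Int)) (f : Nat) (S : Finset Int) (s w : Int) :
    ∀ (l : List Int) (x : Int),
      l.foldl (stepF info edges f S s w) x
        = (l.filter (fun c => decide (sInc info c s > wInc info c w))).foldl
            (fun a c => max a (F info edges f (insert (normN info.length c) S)
              (sInc info c s) (wInc info c w))) x := by
  intro l
  induction l with
  | nil => intro x; rfl
  | cons c t ih =>
    intro x
    by_cases hp : sInc info c s > wInc info c w <;> simp [stepF, hp, ih]

lemma foldl_skip (P : Int → Prop) [DecidablePred P] (step : Int → Int → Int) :
    ∀ (l : List Int) (x : Int),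
      l.foldl (fun a c => if P c then a else step a c) x
        = (l.filter (fun c => !decide (P c))).foldl step x := by
  intro l
  induction l with
  | nil => intro x; rfl
  | cons c t ih =>
    intro x
    by_cases hp : P c <;> simp [hp, ih]

-- children-adjacency list lemmas
lemma length_childrenL_aux (es : List (Int × Int)) :
    ∀ ch : List (List Int),
      (es.foldl (fun ch e =>
        PySem.List.pySetD ch e.1 (PySem.List.pyGetD ch e.1 [] ++ [e.2])) ch).length = ch.length := by
  induction es with
  | nil => intro ch; rfl
  | cons e es ih =>
    intro ch
    rw [List.foldl_cons, ih, PySem.List.length_pySetD]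

lemma length_childrenL (n : Nat) (edges : List (Int × Int)) : (childrenL n edges).length = n := by
  unfold childrenL
  rw [length_childrenL_aux, List.length_replicate]

lemma childs_spec_aux (n : Nat) :
    ∀ (es : List (Int × Int)),
      (∀ e ∈ es, -(n : Int) ≤ e.1 ∧ e.1 < (n : Int)) →
      ∀ (ch : List (List Int)), ch.length = n →
      ∀ (j : Nat), j < n →
      (es.foldl (fun ch e =>
        PySem.List.pySetD ch e.1 (PySem.List.pyGetD ch e.1 [] ++ [e.2])) ch).getD j []
        = ch.getD j [] ++ (es.filter (fun e => decide (normN n e.1 = (j : Int)))).map (fun e => e.2) := by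
  intro es
  induction es with
  | nil => intro _ ch _ j _; simp
  | cons e es ih =>
    intro hes ch hch j hj
    have he := hes e List.mem_cons_self
    have hb := norm_bounds n e.1 he.1 he.2
    rw [List.foldl_cons,
      ih (fun e' he' => hes e' (List.mem_cons_of_mem _ he')) _
        (by rw [PySem.List.length_pySetD]; exact hch) j hj]
    rw [pySetD_norm ch e.1 _ (by rw [hch]; exact he.1) (by rw [hch]; exact he.2),
      pyGetD_norm ch e.1 [] (by rw [hch]; exact he.1) (by rw [hch]; exact he.2)]
    rw [getD_set ch _ j _ [] (by rw [hch]; omega)]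
    rw [List.filter_cons]
    by_cases hsl : normN n e.1 = (j : Int)
    · rw [if_pos (by rw [hch]; omega), if_pos (by simpa using hsl)]
      have hjj : (normN ch.length e.1).toNat = j := by rw [hch]; omega
      rw [hjj]
      simp
    · rw [if_neg (by rw [hch]; omega), if_neg (by simpa using hsl)]

lemma childs_spec (n : Nat) (edges : List (Int × Int))
    (hpre : ∀ e ∈ edges, -(n : Int) ≤ e.1 ∧ e.1 < (n : Int)) (j : Nat) (hj : j < n) :
    (childrenL n edges).getD j []
      = (edges.filter (fun e => decide (normN n e.1 = (j : Int)))).map (fun e => e.2) := by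
  unfold childrenL
  rw [childs_spec_aux n edges hpre (List.replicate n []) (List.length_replicate) j hj]
  rw [List.getD_eq_getElem _ [] (by simpa using hj)]
  simp

-- the frontier invariant is preserved by choosing a node
lemma inv_step (n : Nat) (edges : List (Int × Int)) (S : Finset Int) (frontier : List Int) (node : Int)
    (hInv : ∀ x : Int, (x ∈ frontier ∧ normN n x ∉ S) ↔ x ∈ candL n edges S) :
    ∀ x : Int,
      (x ∈ frontier ++ (edges.filter (fun e => decide (normN n e.1 = normN n node))).map (fun e => e.2) ∧
        normN n x ∉ insert (normN n node) S)
      ↔ x ∈ candL n edges (insert (normN n node) S) := by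
  intro x
  simp only [List.mem_append, List.mem_map, List.mem_filter, decide_eq_true_eq,
    mem_candL, Finset.mem_insert, not_or]
  constructor
  · rintro ⟨hx, hne, hS⟩
    rcases hx with hxf | ⟨e, ⟨he, hpar⟩, rfl⟩
    · obtain ⟨e, he, h1, h2, hx2⟩ := (mem_candL n edges S x).1 ((hInv x).1 ⟨hxf, hS⟩)
      exact ⟨e, he, Or.inr h1, ⟨by rw [hx2]; exact hne, by rw [hx2]; exact hS⟩, hx2⟩
    · exact ⟨e, he, Or.inl hpar, ⟨hne, hS⟩, rfl⟩
  · rintro ⟨e, he, hpar, ⟨hne, hS⟩, rfl⟩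
    refine ⟨?_, hne, hS⟩
    rcases hpar with h1 | h1
    · exact Or.inr ⟨e, ⟨he, h1⟩, rfl⟩
    · left
      exact ((hInv e.2).2 ((mem_candL n edges S e.2).2 ⟨e, he, h1, hS, rfl⟩)).1

-- A's search equals F
lemma dfsA_main (info : List Int) (edges : List (Int × Int))
    (hpre : ∀ e ∈ edges, -(info.length : Int) ≤ e.1 ∧ e.1 < (info.length : Int) ∧
      -(info.length : Int) ≤ e.2 ∧ e.2 < (info.length : Int)) :
    ∀ (f : Nat) (v : List Bool) (a : List Int) (s w : Int),
      v.length = info.length → falseCnt v < f → s > w →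
      ∃ Δ, dfsA info edges f s w (v, a) = (v, a ++ Δ) ∧
        ∀ x, Δ.foldl max x = max x (F info edges (f - 1) (Sv v) s w) := by
  intro f
  induction f using Nat.strong_induction_on with
  | _ f IH =>
  intro v a s w hlen hcnt hs
  obtain ⟨f', rfl⟩ : ∃ f', f = f' + 1 := ⟨f - 1, by omega⟩
  simp only [dfsA, if_pos hs]
  rcases f' with _ | g
  · -- fuel 1: everything is visited, the loop is a no-op
    have hz : falseCnt v = 0 := by omega
    have hnop : ∀ es : List (Int × Int), (∀ e ∈ es, -(info.length : Int) ≤ e.1 ∧ e.1 < (info.length : Int) ∧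
        -(info.length : Int) ≤ e.2 ∧ e.2 < (info.length : Int)) →
        ∀ aa : List Int,
        es.foldl (fun (acc : List Bool × List Int) (e : Int × Int) =>
          if PySem.List.pyGetD acc.1 e.1 false && !(PySem.List.pyGetD acc.1 e.2 false) then
            let st1 := dfsA info edges 0
                (if PySem.List.pyGetD info e.2 0 = 0 then s + 1 else s)
                (if PySem.List.pyGetD info e.2 0 = 0 then w else w + 1)
                (PySem.List.pySetD acc.1 e.2 true, acc.2)
            (PySem.List.pySetD st1.1 e.2 false, st1.2)
          else acc) (v, aa) = (v, aa) := by
      intro es hes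
      induction es with
      | nil => intro aa; rfl
      | cons e es ihe =>
        intro aa
        have he := hes e List.mem_cons_self
        have hvis : PySem.List.pyGetD v e.2 false = true :=
          all_visited_of_falseCnt_zero info.length v hlen e.2 he.2.2.1 he.2.2.2 hz
        simp only [List.foldl_cons, hvis, Bool.not_true, Bool.and_false, Bool.false_eq_true,
          if_false]
        exact ihe (fun e' he' => hes e' (List.mem_cons_of_mem _ he')) aa
    refine ⟨[s], by rw [hnop edges hpre (a ++ [s])], ?_⟩
    intro x
    simp [F]
  · -- fuel g+2: the loop explores the candidates
    have hstep : ∀ (v' : List Bool) (a' : List Int) (s' w' : Int),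
        v'.length = info.length → falseCnt v' < g + 1 → s' > w' →
        ∃ Δ, dfsA info edges (g+1) s' w' (v', a') = (v', a' ++ Δ) ∧
          ∀ x, Δ.foldl max x = max x (F info edges g (Sv v') s' w') := by
      intro v' a' s' w' h1 h2 h3
      simpa using IH (g+1) (by omega) v' a' s' w' h1 h2 h3
    have loop : ∀ es : List (Int × Int), (∀ e ∈ es, -(info.length : Int) ≤ e.1 ∧ e.1 < (info.length : Int) ∧
        -(info.length : Int) ≤ e.2 ∧ e.2 < (info.length : Int)) →
        ∀ aa : List Int,
        ∃ Γ, es.foldl (fun (acc : List Bool × List Int) (e : Int × Int) =>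
          if PySem.List.pyGetD acc.1 e.1 false && !(PySem.List.pyGetD acc.1 e.2 false) then
            let st1 := dfsA info edges (g+1)
                (if PySem.List.pyGetD info e.2 0 = 0 then s + 1 else s)
                (if PySem.List.pyGetD info e.2 0 = 0 then w else w + 1)
                (PySem.List.pySetD acc.1 e.2 true, acc.2)
            (PySem.List.pySetD st1.1 e.2 false, st1.2)
          else acc) (v, aa) = (v, aa ++ Γ) ∧
        ∀ x, Γ.foldl max x = (candL info.length es (Sv v)).foldl (stepF info edges g (Sv v) s w) x := by
      intro es hes
      induction es with
      | nil => intro aa; exact ⟨[], by simp, by simp [candL]⟩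
      | cons e es ihe =>
        intro aa
        have he := hes e List.mem_cons_self
        have hes' := fun e' he' => hes e' (List.mem_cons_of_mem _ he')
        have hp1 : PySem.List.pyGetD v e.1 false = decide (normN info.length e.1 ∈ Sv v) :=
          pyGetD_Sv info.length v hlen e.1 he.1 he.2.1
        have hp2 : PySem.List.pyGetD v e.2 false = decide (normN info.length e.2 ∈ Sv v) :=
          pyGetD_Sv info.length v hlen e.2 he.2.2.1 he.2.2.2
        simp only [List.foldl_cons]
        by_cases hcond : (PySem.List.pyGetD v e.1 false && !(PySem.List.pyGetD v e.2 false)) = true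
        · -- a candidate edge
          have hcand : candL info.length (e :: es) (Sv v) = e.2 :: candL info.length es (Sv v) :=
            candL_cons_pos info.length e es (Sv v) (by rw [← hp1, ← hp2]; exact hcond)
          have hvisc : PySem.List.pyGetD v e.2 false = false := by
            rcases Bool.and_eq_true_iff.mp hcond with ⟨_, h2⟩
            simpa using h2
          by_cases hvia : sInc info e.2 s > wInc info e.2 w
          · obtain ⟨Δc, hΔ, hΔmax⟩ := hstep (PySem.List.pySetD v e.2 true) aa
              (sInc info e.2 s) (wInc info e.2 w)
              (by rw [PySem.List.length_pySetD]; exact hlen)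
              (by have := falseCnt_set info.length v hlen e.2 he.2.2.1 he.2.2.2 hvisc; omega) hvia
            rw [if_pos hcond]
            show ∃ Γ, es.foldl _ ((PySem.List.pySetD (dfsA info edges (g+1) (sInc info e.2 s) (wInc info e.2 w) (PySem.List.pySetD v e.2 true, aa)).1 e.2 false, (dfsA info edges (g+1) (sInc info e.2 s) (wInc info e.2 w) (PySem.List.pySetD v e.2 true, aa)).2)) = _ ∧ _
            rw [hΔ]
            simp only
            rw [restore_set info.length v hlen e.2 he.2.2.1 he.2.2.2 hvisc]
            obtain ⟨Γ', hΓ', hΓ'max⟩ := ihe hes' (aa ++ Δc)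
            refine ⟨Δc ++ Γ', by rw [hΓ']; simp, ?_⟩
            intro x
            rw [List.foldl_append, hΔmax x, Sv_set info.length v hlen e.2 he.2.2.1 he.2.2.2,
              hΓ'max, hcand]
            simp only [List.foldl_cons, stepF, if_pos hvia]
          · rw [if_pos hcond]
            show ∃ Γ, es.foldl _ ((PySem.List.pySetD (dfsA info edges (g+1) (sInc info e.2 s) (wInc info e.2 w) (PySem.List.pySetD v e.2 true, aa)).1 e.2 false, (dfsA info edges (g+1) (sInc info e.2 s) (wInc info e.2 w) (PySem.List.pySetD v e.2 true, aa)).2)) = _ ∧ _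
            rw [dfsA_of_not_gt info edges (g+1) _ _ _ hvia]
            simp only
            rw [restore_set info.length v hlen e.2 he.2.2.1 he.2.2.2 hvisc]
            obtain ⟨Γ', hΓ', hΓ'max⟩ := ihe hes' aa
            refine ⟨Γ', hΓ', ?_⟩
            intro x
            rw [hΓ'max, hcand]
            simp only [List.foldl_cons, stepF, if_neg hvia]
        · -- not a candidate
          have hcand : candL info.length (e :: es) (Sv v) = candL info.length es (Sv v) :=
            candL_cons_neg info.length e es (Sv v) (by rw [← hp1, ← hp2]; simpa using hcond)
          rw [if_neg hcond]
          obtain ⟨Γ', hΓ', hΓ'max⟩ := ihe hes' aa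
          exact ⟨Γ', hΓ', by intro x; rw [hΓ'max, hcand]⟩
    obtain ⟨Γ, hΓ, hΓmax⟩ := loop edges hpre (a ++ [s])
    refine ⟨s :: Γ, by rw [hΓ]; simp, ?_⟩
    intro x
    have h1 : (s :: Γ).foldl max x = Γ.foldl max (max x s) := by simp
    rw [h1, hΓmax (max x s), stepF_init, ← F_succ]
    norm_num

-- B's search equals F
lemma dfsB_main (info : List Int) (edges : List (Int × Int))
    (hpre : ∀ e ∈ edges, -(info.length : Int) ≤ e.1 ∧ e.1 < (info.length : Int) ∧
      -(info.length : Int) ≤ e.2 ∧ e.2 < (info.length : Int)) :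
    ∀ (f : Nat) (chosen : List Bool) (frontier : List Int) (s w : Int),
      chosen.length = info.length →
      (∀ x : Int, (x ∈ frontier ∧ normN info.length x ∉ Sv chosen)
        ↔ x ∈ candL info.length edges (Sv chosen)) →
      falseCnt chosen < f → s > w →
      dfsB info (childrenL info.length edges) f s w chosen frontier
        = F info edges (f - 1) (Sv chosen) s w := by
  intro f
  induction f using Nat.strong_induction_on with
  | _ f IH =>
  intro chosen frontier s w hlen hInv hcnt hs
  obtain ⟨f', rfl⟩ : ∃ f', f = f' + 1 := ⟨f - 1, by omega⟩
  simp only [dfsB]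
  have hSvlen : ∀ y : Int, y ∈ Sv chosen → 0 ≤ y ∧ y < (info.length : Int) := by
    intro y hy
    have := Sv_bounds chosen y hy
    omega
  have hrange : ∀ node : Int, node ∈ frontier → normN info.length node ∉ Sv chosen →
      -(info.length : Int) ≤ node ∧ node < (info.length : Int) := by
    intro node h1 h2
    obtain ⟨e, he, _, _, rfl⟩ :=
      (mem_candL info.length edges (Sv chosen) node).1 ((hInv node).1 ⟨h1, h2⟩)
    exact ⟨(hpre e he).2.2.1, (hpre e he).2.2.2⟩
  have hrange' : ∀ node : Int, normN info.length node ∈ Sv chosen →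
      -(info.length : Int) ≤ node ∧ node < (info.length : Int) := by
    intro node h
    have := hSvlen _ h
    exact inR_of_norm_mem_Iio info.length node this.1 this.2
  have hpoint : ∀ (best : Int), ∀ node ∈ frontier,
      (if PySem.List.pyGetD chosen node false then best
       else
        let s' := if PySem.List.pyGetD info node 0 = 0 then s + 1 else s
        let w' := if PySem.List.pyGetD info node 0 = 0 then w else w + 1
        if s' > w' then
          let r := dfsB info (childrenL info.length edges) f' s' w'
            (PySem.List.pySetD chosen node true)
            (frontier ++ PySem.List.pyGetD (childrenL info.length edges) node [])
          if r > best then r else best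
        else best)
      = (if normN info.length node ∈ Sv chosen then best
         else stepF info edges (f' - 1) (Sv chosen) s w best node) := by
    intro best node hmem
    by_cases hc : normN info.length node ∈ Sv chosen
    · have hr := hrange' node hc
      have hct : PySem.List.pyGetD chosen node false = true := by
        rw [pyGetD_Sv info.length chosen hlen node hr.1 hr.2]
        simpa using hc
      simp only [hct, if_true, hc]
    · have hr := hrange node hmem hc
      have hcf : PySem.List.pyGetD chosen node false = false := by
        rw [pyGetD_Sv info.length chosen hlen node hr.1 hr.2]
        simpa using hc
      simp only [hcf, Bool.false_eq_true, if_false, hc]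
      show (if sInc info node s > wInc info node w then
          (if dfsB info (childrenL info.length edges) f' (sInc info node s) (wInc info node w)
              (PySem.List.pySetD chosen node true)
              (frontier ++ PySem.List.pyGetD (childrenL info.length edges) node []) > best
            then dfsB info (childrenL info.length edges) f' (sInc info node s) (wInc info node w)
              (PySem.List.pySetD chosen node true)
              (frontier ++ PySem.List.pyGetD (childrenL info.length edges) node [])
            else best)
          else best) = stepF info edges (f' - 1) (Sv chosen) s w best node
      by_cases hvia : sInc info node s > wInc info node w
      · have hlen' : (PySem.List.pySetD chosen node true).length = info.length := by
          rw [PySem.List.length_pySetD]; exact hlen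
        have hSv' : Sv (PySem.List.pySetD chosen node true)
            = insert (normN info.length node) (Sv chosen) :=
          Sv_set info.length chosen hlen node hr.1 hr.2
        have hcnt' : falseCnt (PySem.List.pySetD chosen node true) < f' := by
          have := falseCnt_set info.length chosen hlen node hr.1 hr.2 hcf
          omega
        have hchild : PySem.List.pyGetD (childrenL info.length edges) node []
            = (edges.filter (fun e => decide (normN info.length e.1 = normN info.length node))).map
                (fun e => e.2) := by
          have hb := norm_bounds info.length node hr.1 hr.2
          rw [pyGetD_norm _ node []
            (by rw [length_childrenL]; exact hr.1) (by rw [length_childrenL]; exact hr.2)]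
          rw [length_childrenL]
          rw [childs_spec info.length edges (fun e he => ⟨(hpre e he).1, (hpre e he).2.1⟩)
            (normN info.length node).toNat (by omega)]
          have hcast : (((normN info.length node).toNat : Nat) : Int) = normN info.length node := by
            omega
          rw [hcast]
        have hInv' : ∀ x : Int,
            (x ∈ frontier ++ PySem.List.pyGetD (childrenL info.length edges) node [] ∧
              normN info.length x ∉ Sv (PySem.List.pySetD chosen node true))
            ↔ x ∈ candL info.length edges (Sv (PySem.List.pySetD chosen node true)) := by
          rw [hSv', hchild]
          exact inv_step info.length edges (Sv chosen) frontier node hInv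
        have hrec := IH f' (by omega) (PySem.List.pySetD chosen node true)
          (frontier ++ PySem.List.pyGetD (childrenL info.length edges) node [])
          (sInc info node s) (wInc info node w) hlen' hInv' hcnt' hvia
        rw [hSv'] at hrec
        rw [if_pos hvia, hrec]
        simp only [stepF, if_pos hvia]
        by_cases h : F info edges (f' - 1) (insert (normN info.length node) (Sv chosen))
            (sInc info node s) (wInc info node w) ≤ best
        · rw [if_neg (by omega), max_eq_left h]
        · rw [if_pos (by omega), max_eq_right (by omega)]
      · rw [if_neg hvia]
        simp only [stepF, if_neg hvia]
  have hcong := PySem.List.foldl_congr_mem frontier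
    (fun best node =>
      if PySem.List.pyGetD chosen node false then best
      else
        let s' := if PySem.List.pyGetD info node 0 = 0 then s + 1 else s
        let w' := if PySem.List.pyGetD info node 0 = 0 then w else w + 1
        if s' > w' then
          let r := dfsB info (childrenL info.length edges) f' s' w'
            (PySem.List.pySetD chosen node true)
            (frontier ++ PySem.List.pyGetD (childrenL info.length edges) node [])
          if r > best then r else best
        else best)
    (fun a c => if normN info.length c ∈ Sv chosen then a
      else stepF info edges (f' - 1) (Sv chosen) s w a c) s hpoint
  have hmemiff : ∀ c : Int,
      c ∈ (frontier.filter (fun c => !decide (normN info.length c ∈ Sv chosen))).filter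
            (fun c => decide (sInc info c s > wInc info c w))
        ↔ c ∈ (candL info.length edges (Sv chosen)).filter
            (fun c => decide (sInc info c s > wInc info c w)) := by
    intro c
    simp only [List.mem_filter, Bool.not_eq_eq_eq_not, Bool.not_true, decide_eq_false_iff_not,
      decide_eq_true_eq]
    constructor
    · rintro ⟨⟨h1, h2⟩, h3⟩
      exact ⟨(hInv c).1 ⟨h1, h2⟩, h3⟩
    · rintro ⟨h1, h2⟩
      obtain ⟨h3, h4⟩ := (hInv c).2 h1
      exact ⟨⟨h3, h4⟩, h2⟩
  rw [hcong, foldl_skip (fun c => normN info.length c ∈ Sv chosen)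
    (stepF info edges (f' - 1) (Sv chosen) s w), stepF_filter]
  rw [foldl_max_set_congr
    (fun c => F info edges (f' - 1) (insert (normN info.length c) (Sv chosen))
      (sInc info c s) (wInc info c w))
    ((frontier.filter (fun c => !decide (normN info.length c ∈ Sv chosen))).filter
      (fun c => decide (sInc info c s > wInc info c w)))
    ((candL info.length edges (Sv chosen)).filter
      (fun c => decide (sInc info c s > wInc info c w)))
    hmemiff s]
  rw [← stepF_filter]
  rcases f' with _ | g
  · have hempty : candL info.length edges (Sv chosen) = [] := by
      rw [List.eq_nil_iff_forall_not_mem]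
      intro x hx
      obtain ⟨e, he, h1, h2, rfl⟩ := (mem_candL info.length edges (Sv chosen) x).1 hx
      have hz : falseCnt chosen = 0 := by omega
      have := all_visited_of_falseCnt_zero info.length chosen hlen e.2
        (hpre e he).2.2.1 (hpre e he).2.2.2 hz
      rw [pyGetD_Sv info.length chosen hlen e.2 (hpre e he).2.2.1 (hpre e he).2.2.2] at this
      simp at this
      exact h2 this
    simp [hempty, F]
  · rw [← F_succ]
    norm_num

lemma Sv_init (n : Nat) (hn : 0 < n) : Sv ((List.replicate n false).set 0 true) = {0} := by
  ext x
  rw [mem_Sv, Finset.mem_singleton]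
  simp only [List.length_set, List.length_replicate]
  constructor
  · rintro ⟨i, hi, hv, rfl⟩
    rcases Nat.eq_zero_or_pos i with rfl | hip
    · rfl
    · exfalso
      rw [getD_set _ 0 i true false (by simpa using hn)] at hv
      rw [if_neg (by omega)] at hv
      rw [List.getD_eq_getElem _ false (by simpa using hi)] at hv
      simp at hv
  · rintro rfl
    exact ⟨0, hn, by rw [getD_set _ 0 0 true false (by simpa using hn)]; simp, rfl⟩

-- ===== VERDICT (by name: the statement is the Claim_ definition above) =====
theorem solution_spec : Claim_equal_solution := by
  unfold Claim_equal_solution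
  intro info edges hdom hpre
  unfold Spec_solution solution solution_alt
  obtain ⟨hne, hpree⟩ := hpre
  have hn0 : info.length ≠ 0 := fun h => hne (List.eq_nil_of_length_eq_zero h)
  have hn : 0 < info.length := by omega
  have hv0 : PySem.List.pySetD (List.replicate info.length false) 0 true
      = (List.replicate info.length false).set 0 true := by
    rw [PySem.List.pySetD_of_nonneg _ _ (by norm_num)]
    rfl
  have hlen : (PySem.List.pySetD (List.replicate info.length false) 0 true).length = info.length := by
    rw [PySem.List.length_pySetD, List.length_replicate]
  have hcnt : falseCnt (PySem.List.pySetD (List.replicate info.length false) 0 true)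
      < info.length + 1 := by
    have := List.countP_le_length (l := PySem.List.pySetD (List.replicate info.length false) 0 true)
      (p := fun b => !b)
    unfold falseCnt
    omega
  have hSv : Sv (PySem.List.pySetD (List.replicate info.length false) 0 true) = {0} := by
    rw [hv0]
    exact Sv_init info.length hn
  obtain ⟨Δ, hΔ, hmax⟩ := dfsA_main info edges hpree (info.length + 1)
    (PySem.List.pySetD (List.replicate info.length false) 0 true) [] 1 0 hlen hcnt (by norm_num)
  have hA : (PySem.List.max?
      (dfsA info edges (info.length + 1) 1 0
        (PySem.List.pySetD (List.replicate info.length false) 0 true, [])).2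
      (fun y => y)).getD 0 = F info edges info.length {0} 1 0 := by
    rw [hΔ]
    simp only [List.nil_append]
    apply max?_of_foldl
    intro x
    rw [hmax x, hSv]
    norm_num
  have hfr0 : PySem.List.pyGetD (childrenL info.length edges) 0 []
      = (edges.filter (fun e => decide (normN info.length e.1 = (0 : Int)))).map (fun e => e.2) := by
    rw [pyGetD_norm _ 0 [] (by rw [length_childrenL]; omega) (by rw [length_childrenL]; exact_mod_cast hn)]
    rw [length_childrenL]
    rw [childs_spec info.length edges (fun e he => ⟨(hpree e he).1, (hpree e he).2.1⟩)
      (normN info.length 0).toNat (by unfold normN; simp; omega)]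
    have hcast : (((normN info.length 0).toNat : Nat) : Int) = (0 : Int) := by
      unfold normN; simp
    rw [hcast]
  have hInv0 : ∀ x : Int,
      (x ∈ PySem.List.pyGetD (childrenL info.length edges) 0 [] ∧
        normN info.length x ∉ Sv (PySem.List.pySetD (List.replicate info.length false) 0 true))
      ↔ x ∈ candL info.length edges
          (Sv (PySem.List.pySetD (List.replicate info.length false) 0 true)) := by
    intro x
    rw [hSv, hfr0]
    simp only [List.mem_map, List.mem_filter, decide_eq_true_eq, mem_candL,
      Finset.mem_singleton]
    constructor
    · rintro ⟨⟨e, ⟨he, h1⟩, rfl⟩, h2⟩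
      exact ⟨e, he, h1, h2, rfl⟩
    · rintro ⟨e, he, h1, h2, rfl⟩
      exact ⟨⟨e, ⟨he, h1⟩, rfl⟩, h2⟩
  have hB := dfsB_main info edges hpree (info.length + 1)
    (PySem.List.pySetD (List.replicate info.length false) 0 true)
    (PySem.List.pyGetD (childrenL info.length edges) 0 []) 1 0 hlen hInv0 hcnt (by norm_num)
  rw [hSv] at hB
  show (PySem.List.max?
      (dfsA info edges (info.length + 1) 1 0
        (PySem.List.pySetD (List.replicate info.length false) 0 true, [])).2
      (fun y => y)).getD 0
    = dfsB info (childrenL info.length edges) (info.length + 1) 1 0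
        (PySem.List.pySetD (List.replicate info.length false) 0 true)
        (PySem.List.pyGetD (childrenL info.length edges) 0 [])
  rw [hA, hB]
  have hfin : info.length + 1 - 1 = info.length := by omega
  rw [hfin]
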